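-- pv_equiv track=rewrite | github.com/robs1412/ai_workspace | frank/scripts/frank_daily_report.py | parse_bullet_items
-- ===== SOURCE A (Python) =====
-- def parse_bullet_items(lines: list[tuple[int, str]]) -> list[tuple[int, str, list[str]]]:
--     items: list[tuple[int, str, list[str]]] = []
--     current: tuple[int, str, list[str]] | None = None
--     for line_no, raw in lines:
--         if raw.startswith("- "):
--             if current:
--                 items.append(current)
--             current = (line_no, raw[2:].strip(), [])
--         elif current and (raw.startswith("  - ") or raw.startswith("    - ")):
--             current[2].append(raw.strip()[2:].strip() if raw.strip().startswith("- ") else raw.strip())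
--         elif current and raw.strip():
--             current[2].append(raw.strip())
--     if current:
--         items.append(current)
--     return items
-- ===== SOURCE B (Python) =====
-- def _classify(raw: str):
--     """Classify a non-head line: the sub-item text it contributes, or None."""
--     s = raw.strip()
--     if raw.startswith("  - ") or raw.startswith("    - "):
--         return s[2:].strip() if s.startswith("- ") else s
--     return s if s else None
--
--
-- def parse_bullet_items(lines: list[tuple[int, str]]) -> list[tuple[int, str, list[str]]]:
--     # Walk the lines back-to-front: collect pending sub-item texts until the
--     # head bullet above them appears, then emit that item; sub-lines with no
--     # head above them (before the first bullet) are simply left over and dropped.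
--     items: list[tuple[int, str, list[str]]] = []
--     pending: list[str] = []
--     for line_no, raw in reversed(lines):
--         if raw.startswith("- "):
--             items.append((line_no, raw[2:].strip(), list(reversed(pending))))
--             pending = []
--         else:
--             sub = _classify(raw)
--             if sub is not None:
--                 pending.append(sub)
--     items.reverse()
--     return items
-- ===== Notes on version B (the rewrite author's own statement) =====
-- stated objective: alternative
-- what changed: B traverses the lines back-to-front with a plain pending-sub-items list, emitting each item when its head bullet is reached and dropping leftovers, instead of A's forward loop with an Optional current item and a final flush.
import Mathlib
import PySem

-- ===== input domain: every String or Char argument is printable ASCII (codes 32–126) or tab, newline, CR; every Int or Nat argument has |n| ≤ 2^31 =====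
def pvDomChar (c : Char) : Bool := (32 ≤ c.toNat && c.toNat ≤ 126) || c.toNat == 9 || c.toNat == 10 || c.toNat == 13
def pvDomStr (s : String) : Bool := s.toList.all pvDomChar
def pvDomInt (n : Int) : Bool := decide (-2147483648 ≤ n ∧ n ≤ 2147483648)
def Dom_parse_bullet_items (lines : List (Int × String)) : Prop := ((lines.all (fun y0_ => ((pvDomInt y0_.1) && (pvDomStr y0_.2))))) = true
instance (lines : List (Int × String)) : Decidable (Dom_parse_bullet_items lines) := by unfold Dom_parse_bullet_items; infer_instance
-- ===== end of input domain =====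

-- B replaces A's forward loop with an Optional "current" item and a final flush by a
-- back-to-front traversal with a plain pending-sub-items list (objective: alternative).

-- ===== PORT A =====
-- Literal port of A: one forward fold over the lines with state (items, current : Option item),
-- followed by the final `if current: items.append(current)` flush.
def parse_bullet_items (lines : List (Int × String)) : List (Int × String × List String) :=
  let st := lines.foldl
    (fun (st : List (Int × String × List String) × Option (Int × String × List String)) l =>
      let items := st.1
      let current := st.2
      let line_no := l.1
      let raw := l.2
      if PySem.Str.startswith raw "- " then
        ((match current with
          | some c => items ++ [c]
          | none => items),
         some (line_no, PySem.Str.strip (PySem.Str.slice raw (some 2) none), []))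
      else
        match current with
        | some c =>
          if PySem.Str.startswith raw "  - " || PySem.Str.startswith raw "    - " then
            (items, some (c.1, c.2.1, c.2.2 ++
              [if PySem.Str.startswith (PySem.Str.strip raw) "- " then
                 PySem.Str.strip (PySem.Str.slice (PySem.Str.strip raw) (some 2) none)
               else PySem.Str.strip raw]))
          else if PySem.Str.strip raw ≠ "" then
            (items, some (c.1, c.2.1, c.2.2 ++ [PySem.Str.strip raw]))
          else (items, some c)
        | none => (items, none))
    ([], none)
  match st.2 with
  | some c => st.1 ++ [c]
  | none => st.1

-- ===== PORT B =====
-- Port of B's helper _classify: the sub-item text a non-head line contributes, or none.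
def pvClassify (raw : String) : Option String :=
  let s := PySem.Str.strip raw
  if PySem.Str.startswith raw "  - " || PySem.Str.startswith raw "    - " then
    some (if PySem.Str.startswith s "- " then PySem.Str.strip (PySem.Str.slice s (some 2) none) else s)
  else if s ≠ "" then some s else none

-- Literal port of B: fold over `reversed(lines)` with state (items, pending); a head line
-- emits (line_no, title, reversed pending); finally the items list itself is reversed.
def parse_bullet_items_alt (lines : List (Int × String)) : List (Int × String × List String) :=
  let st := lines.reverse.foldl
    (fun (st : List (Int × String × List String) × List String) l =>
      if PySem.Str.startswith l.2 "- " then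
        (st.1 ++ [(l.1, PySem.Str.strip (PySem.Str.slice l.2 (some 2) none), st.2.reverse)], [])
      else
        match pvClassify l.2 with
        | some s => (st.1, st.2 ++ [s])
        | none => st)
    ([], [])
  st.1.reverse

-- ===== PRECONDITION & SPEC =====
def Spec_parse_bullet_items (lines : List (Int × String)) (out : List (Int × String × List String)) : Prop := out = parse_bullet_items_alt lines
instance (lines : List (Int × String)) (out : List (Int × String × List String)) : Decidable (Spec_parse_bullet_items lines out) := by unfold Spec_parse_bullet_items; infer_instance

-- ===== CLAIM (what is proved, stated in full; the proofs are below) =====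
def Claim_equal_parse_bullet_items : Prop := ∀ (lines : List (Int × String)), Dom_parse_bullet_items lines → Spec_parse_bullet_items lines (parse_bullet_items lines)

-- ===== LEMMAS AND PROOFS =====

-- Named copy of A's loop body (proof-side only; the port keeps its inline lambda).
def pvStepA (st : List (Int × String × List String) × Option (Int × String × List String))
    (l : Int × String) :
    List (Int × String × List String) × Option (Int × String × List String) :=
  let items := st.1
  let current := st.2
  let line_no := l.1
  let raw := l.2
  if PySem.Str.startswith raw "- " then
    ((match current with
      | some c => items ++ [c]
      | none => items),
     some (line_no, PySem.Str.strip (PySem.Str.slice raw (some 2) none), []))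
  else
    match current with
    | some c =>
      if PySem.Str.startswith raw "  - " || PySem.Str.startswith raw "    - " then
        (items, some (c.1, c.2.1, c.2.2 ++
          [if PySem.Str.startswith (PySem.Str.strip raw) "- " then
             PySem.Str.strip (PySem.Str.slice (PySem.Str.strip raw) (some 2) none)
           else PySem.Str.strip raw]))
      else if PySem.Str.strip raw ≠ "" then
        (items, some (c.1, c.2.1, c.2.2 ++ [PySem.Str.strip raw]))
      else (items, some c)
    | none => (items, none)

-- A's final `if current: items.append(current)` flush.
def pvFin (st : List (Int × String × List String) × Option (Int × String × List String)) :
    List (Int × String × List String) :=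
  match st.2 with
  | some c => st.1 ++ [c]
  | none => st.1

theorem pvPortA_eq (lines : List (Int × String)) :
    parse_bullet_items lines = pvFin (lines.foldl pvStepA ([], none)) := rfl

-- Recursive characterisation of A's forward loop, parameterised by the current item.
def pvProcA : Option (Int × String × List String) → List (Int × String) →
    List (Int × String × List String)
  | cur, [] => cur.toList
  | cur, l :: rest =>
    if PySem.Str.startswith l.2 "- " then
      cur.toList ++ pvProcA (some (l.1, PySem.Str.strip (PySem.Str.slice l.2 (some 2) none), [])) rest
    else
      match cur with
      | none => pvProcA none rest
      | some c => pvProcA (some (c.1, c.2.1, c.2.2 ++ (pvClassify l.2).toList)) rest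

-- One step of A's loop, expressed through pvClassify.
theorem pvStepA_head (items : List (Int × String × List String))
    (cur : Option (Int × String × List String)) (l : Int × String)
    (hh : PySem.Str.startswith l.2 "- " = true) :
    pvStepA (items, cur) l =
      ((match cur with | some c => items ++ [c] | none => items),
       some (l.1, PySem.Str.strip (PySem.Str.slice l.2 (some 2) none), [])) := by
  simp at hh
  simp [pvStepA, hh]

theorem pvStepA_none (items : List (Int × String × List String)) (l : Int × String)
    (hh : ¬ PySem.Str.startswith l.2 "- " = true) :
    pvStepA (items, none) l = (items, none) := by
  simp at hh
  simp [pvStepA, hh]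

theorem pvStepA_some (items : List (Int × String × List String))
    (c : Int × String × List String) (l : Int × String)
    (hh : ¬ PySem.Str.startswith l.2 "- " = true) :
    pvStepA (items, some c) l = (items, some (c.1, c.2.1, c.2.2 ++ (pvClassify l.2).toList)) := by
  simp at hh
  by_cases hb : (PySem.Str.startswith l.2 "  - " || PySem.Str.startswith l.2 "    - ") = true
  · simp at hb
    simp [pvStepA, pvClassify, hh, hb]
  · simp at hb
    by_cases hs : PySem.Str.strip l.2 = ""
    · simp [pvStepA, pvClassify, hh, hb, hs]
    · simp [pvStepA, pvClassify, hh, hb, hs]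

-- Fold invariant: A's loop from any state computes pvProcA of the remaining lines.
theorem pvA_fold : ∀ (lines : List (Int × String))
    (items : List (Int × String × List String))
    (cur : Option (Int × String × List String)),
    pvFin (List.foldl pvStepA (items, cur) lines) = items ++ pvProcA cur lines
  | [], items, cur => by cases cur <;> simp [pvFin, pvProcA]
  | l :: rest, items, cur => by
    rw [List.foldl_cons]
    by_cases hh : PySem.Str.startswith l.2 "- " = true
    · rw [pvStepA_head items cur l hh, pvA_fold rest]
      simp at hh
      cases cur <;> simp [pvProcA, hh]
    · rcases cur with _ | c
      · rw [pvStepA_none items l hh, pvA_fold rest]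
        simp at hh
        simp [pvProcA, hh]
      · rw [pvStepA_some items c l hh, pvA_fold rest]
        simp at hh
        simp [pvProcA, hh]

-- B's fold over the reversed list, as structural recursion on the original list.
def pvProcB : List (Int × String) → List (Int × String × List String) × List String
  | [] => ([], [])
  | l :: rest =>
    let st := pvProcB rest
    if PySem.Str.startswith l.2 "- " then
      (st.1 ++ [(l.1, PySem.Str.strip (PySem.Str.slice l.2 (some 2) none), st.2.reverse)], [])
    else
      match pvClassify l.2 with
      | some s => (st.1, st.2 ++ [s])
      | none => st

-- B's port computes (pvProcB lines).1.reverse.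
theorem pvB_eq_procB (lines : List (Int × String)) :
    parse_bullet_items_alt lines = (pvProcB lines).1.reverse := by
  have h : ∀ (ls : List (Int × String)),
      ls.foldr
        (fun (l : Int × String) (st : List (Int × String × List String) × List String) =>
          if PySem.Str.startswith l.2 "- " then
            (st.1 ++ [(l.1, PySem.Str.strip (PySem.Str.slice l.2 (some 2) none), st.2.reverse)], [])
          else
            match pvClassify l.2 with
            | some s => (st.1, st.2 ++ [s])
            | none => st)
        ([], []) = pvProcB ls := by
    intro ls
    induction ls with
    | nil => simp [pvProcB]
    | cons l rest ih =>
      rw [List.foldr_cons, ih]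
      rfl
  simp only [parse_bullet_items_alt, List.foldl_reverse]
  rw [h]

-- Core correspondence: pvProcA read off pvProcB.
theorem pvProc_corr (lines : List (Int × String)) :
    pvProcA none lines = (pvProcB lines).1.reverse ∧
    ∀ (m : Int) (t : String) (s : List String),
      pvProcA (some (m, t, s)) lines =
        (m, t, s ++ (pvProcB lines).2.reverse) :: (pvProcB lines).1.reverse := by
  induction lines with
  | nil => simp [pvProcA, pvProcB]
  | cons l rest ih =>
    obtain ⟨ih1, ih2⟩ := ih
    by_cases hh : PySem.Str.startswith l.2 "- " = true
    · simp at hh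
      constructor
      · simp [pvProcA, pvProcB, hh, ih2]
      · intro m t s
        simp [pvProcA, pvProcB, hh, ih2]
    · simp at hh
      cases hc : pvClassify l.2 with
      | none =>
        constructor
        · simp [pvProcA, pvProcB, hh, hc, ih1]
        · intro m t s
          simp [pvProcA, pvProcB, hh, hc, ih2]
      | some x =>
        constructor
        · simp [pvProcA, pvProcB, hh, hc, ih1]
        · intro m t s
          simp [pvProcA, pvProcB, hh, hc, ih2]

-- ===== VERDICT (by name: the statement is the Claim_ definition above) =====
theorem parse_bullet_items_spec : Claim_equal_parse_bullet_items := by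
  intro lines _
  unfold Spec_parse_bullet_items
  rw [pvPortA_eq, pvA_fold lines [] none, List.nil_append, pvB_eq_procB,
    (pvProc_corr lines).1]
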